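-- pv_equiv track=rewrite | github.com/paratpanu18/Object-Oriented-Data-Structure | Excercise/ch_09/4.py | sort_dict_by_key
-- ===== SOURCE A (Python) =====
-- def sort_dict_by_key(input_dict):
--     keys = list(input_dict.keys())
--
--     # BBsort
--     n = len(keys)
--     for i in range(n):
--         for j in range(0, n-i-1):
--             if keys[j] > keys[j+1]:
--                 keys[j], keys[j+1] = keys[j+1], keys[j]
--
--     sorted_dict = {}
--     for key in keys:
--         sorted_dict[key] = input_dict[key]
--
--     return sorted_dict
-- ===== SOURCE B (Python) =====
-- def sort_dict_by_key(input_dict):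
--     return {key: input_dict[key] for key in sorted(input_dict)}
-- ===== Notes on version B (the rewrite author's own statement) =====
-- stated objective: faster
-- what changed: Replaces the hand-written O(n^2) bubble sort over the key list plus an explicit rebuild loop with a single dict comprehension over sorted(input_dict).
import Mathlib
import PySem

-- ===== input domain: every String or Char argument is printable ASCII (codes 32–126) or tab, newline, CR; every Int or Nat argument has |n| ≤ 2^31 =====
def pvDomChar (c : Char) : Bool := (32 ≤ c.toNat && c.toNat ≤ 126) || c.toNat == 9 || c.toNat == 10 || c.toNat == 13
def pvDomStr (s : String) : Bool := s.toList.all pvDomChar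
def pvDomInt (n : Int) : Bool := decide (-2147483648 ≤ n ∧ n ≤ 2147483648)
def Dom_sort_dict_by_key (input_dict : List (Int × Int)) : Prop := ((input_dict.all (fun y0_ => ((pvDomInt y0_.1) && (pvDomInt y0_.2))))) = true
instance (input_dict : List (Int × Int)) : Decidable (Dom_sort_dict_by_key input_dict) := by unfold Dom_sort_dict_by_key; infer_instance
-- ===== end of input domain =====

-- B replaces A's hand-written bubble sort + rebuild loop with one pass over sorted keys (measurably faster, asymptotic).


-- ===== PORT A =====
-- loop body of A's inner bubble loop: `if keys[j] > keys[j+1]: keys[j], keys[j+1] = keys[j+1], keys[j]`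
-- (indices j, j+1 are always in range when A runs this, so pyGetD's default is never read)
def pvSwap (ks : List Int) (j : Int) : List Int :=
  let a := PySem.List.pyGetD ks j 0
  let b := PySem.List.pyGetD ks (j + 1) 0
  if a > b then (ks.set j.toNat b).set (j + 1).toNat a else ks

def sort_dict_by_key (input_dict : List (Int × Int)) : List (Int × Int) :=
  let d := PySem.Dict.ofList input_dict
  let keys0 := d.keys
  let n := keys0.length
  let keys := (PySem.List.pyRange 0 (n : Int) 1).foldl
    (fun ks i => (PySem.List.pyRange 0 ((n : Int) - i - 1) 1).foldl pvSwap ks) keys0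
  -- `sorted_dict[key] = input_dict[key]`: key is always present, so getD's default is never read
  let sorted_dict := keys.foldl (fun sd key => sd.insert key (PySem.Dict.getD d key 0)) PySem.Dict.empty
  sorted_dict.items

-- ===== PORT B =====
def sort_dict_by_key_alt (input_dict : List (Int × Int)) : List (Int × Int) :=
  let d := PySem.Dict.ofList input_dict
  ((PySem.List.sorted d.keys (fun k => k) false).foldl
    (fun sd key => sd.insert key (PySem.Dict.getD d key 0)) PySem.Dict.empty).items

-- ===== PRECONDITION & SPEC =====
def Spec_sort_dict_by_key (input_dict : List (Int × Int)) (out : List (Int × Int)) : Prop := out = sort_dict_by_key_alt input_dict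
instance (input_dict : List (Int × Int)) (out : List (Int × Int)) : Decidable (Spec_sort_dict_by_key input_dict out) := by unfold Spec_sort_dict_by_key; infer_instance

-- ===== CLAIM (what is proved, stated in full; the proofs are below) =====
def Claim_equal_sort_dict_by_key : Prop := ∀ (input_dict : List (Int × Int)), Dom_sort_dict_by_key input_dict → Spec_sort_dict_by_key input_dict (sort_dict_by_key input_dict)

-- ===== LEMMAS AND PROOFS =====

-- one truncated bubble pass: passN m processes the adjacent pairs at positions 0..m-1
def passN : Nat → List Int → List Int
  | 0, l => l
  | _ + 1, [] => []
  | _ + 1, [a] => [a]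
  | m + 1, a :: b :: t => if a > b then b :: passN m (a :: t) else a :: passN m (b :: t)

lemma pvSwap_cons (x : Int) (l : List Int) (j : Int) (hj : 0 ≤ j) :
    pvSwap (x :: l) (j + 1) = x :: pvSwap l j := by
  have h1 : (j + 1).toNat = j.toNat + 1 := by omega
  have h2 : (j + 1 + 1).toNat = (j + 1).toNat + 1 := by omega
  simp only [pvSwap, PySem.List.pyGetD_of_nonneg _ _ hj,
    PySem.List.pyGetD_of_nonneg _ _ (by omega : (0:Int) ≤ j + 1),
    PySem.List.pyGetD_of_nonneg _ _ (by omega : (0:Int) ≤ j + 1 + 1),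
    h1, h2, List.getD_cons_succ, List.set_cons_succ]
  split <;> rfl

lemma foldl_pvSwap_shift (js : List Nat) (c : Int) (l : List Int) :
    js.foldl (fun s (j : Nat) => pvSwap s ((j : Int) + 1)) (c :: l)
      = c :: js.foldl (fun s (j : Nat) => pvSwap s (j : Int)) l := by
  induction js generalizing l with
  | nil => rfl
  | cons j js ih =>
      simp only [List.foldl_cons, pvSwap_cons c l (j : Int) (by positivity)]
      exact ih _

lemma inner_eq_passN : ∀ (m : Nat) (ks : List Int), m < ks.length →
    (PySem.List.pyRange 0 (m : Int) 1).foldl pvSwap ks = passN m ks := by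
  intro m
  induction m with
  | zero => intro ks _; rfl
  | succ m ih =>
      intro ks hlen
      match ks, hlen with
      | a :: b :: t, h2 =>
        rw [PySem.List.pyRange_zero_natCast, List.range_succ_eq_map, List.map_cons,
          List.foldl_cons, List.foldl_map, List.foldl_map]
        have hswap0 : pvSwap (a :: b :: t) ((0:Nat) : Int)
            = if a > b then b :: a :: t else a :: b :: t := by
          norm_num [pvSwap, PySem.List.pyGetD_of_nonneg]
        rw [hswap0]
        simp only [Nat.succ_eq_add_one, Nat.cast_add, Nat.cast_one]
        have hm : m < t.length + 1 := by simp at h2; omega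
        by_cases hab : a > b
        · rw [if_pos hab, foldl_pvSwap_shift (List.range m) b (a :: t),
            ← List.foldl_map, ← PySem.List.pyRange_zero_natCast,
            ih (a :: t) (by simpa using hm)]
          simp [passN, hab]
        · rw [if_neg hab, foldl_pvSwap_shift (List.range m) a (b :: t),
            ← List.foldl_map, ← PySem.List.pyRange_zero_natCast,
            ih (b :: t) (by simpa using hm)]
          simp [passN, hab]

def bubAux : Nat → List Int → List Int
  | 0, l => l
  | m + 1, l => bubAux m (passN m l)

lemma passN_perm : ∀ (m : Nat) (l : List Int), (passN m l).Perm l := by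
  intro m
  induction m with
  | zero => intro l; rfl
  | succ m ih =>
      intro l
      match l with
      | [] => rfl
      | [a] => rfl
      | a :: b :: t =>
        by_cases hab : a > b
        · simpa [passN, hab] using
            ((ih (a :: t)).cons b).trans (List.Perm.swap a b t)
        · simpa [passN, hab] using (ih (b :: t)).cons a

lemma passN_length (m : Nat) (l : List Int) : (passN m l).length = l.length :=
  (passN_perm m l).length_eq

lemma passN_append : ∀ (m : Nat) (u v : List Int), m + 1 ≤ u.length →
    passN m (u ++ v) = passN m u ++ v := by
  intro m
  induction m with
  | zero => intro u v _; rfl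
  | succ m ih =>
      intro u v hu
      match u, hu with
      | a :: b :: t, h2 =>
        have ht : m + 1 ≤ (a :: t).length := by simp at h2 ⊢; omega
        have ht' : m + 1 ≤ (b :: t).length := by simp at h2 ⊢; omega
        rw [List.cons_append, List.cons_append, passN, passN]
        by_cases hab : a > b
        · rw [if_pos hab, if_pos hab, show a :: (t ++ v) = (a :: t) ++ v from rfl,
            ih _ v ht, List.cons_append]
        · rw [if_neg hab, if_neg hab, show b :: (t ++ v) = (b :: t) ++ v from rfl,
            ih _ v ht', List.cons_append]

lemma passN_max : ∀ (m : Nat) (u : List Int), u.length = m + 1 →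
    ∃ w b, passN m u = w ++ [b] ∧ (w ++ [b]).Perm u ∧ ∀ x ∈ u, x ≤ b := by
  intro m
  induction m with
  | zero =>
      intro u hu
      match u, hu with
      | [a], _ =>
        exact ⟨[], a, rfl, List.Perm.refl _, by simp⟩
  | succ m ih =>
      intro u hu
      match u, hu with
      | a :: b :: t, h2 =>
        have h2' : (a :: b :: t).length = m + 1 + 1 := h2
        by_cases hab : a > b
        · obtain ⟨w, c, hw, hperm, hbound⟩ := ih (a :: t) (by simp at h2' ⊢; omega)
          refine ⟨b :: w, c, by simp [passN, hab, hw], ?_, ?_⟩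
          · exact (hperm.cons b).trans (List.Perm.swap a b t)
          · intro x hx
            rcases List.mem_cons.mp hx with rfl | hx'
            · exact hbound x (by simp)
            · rcases List.mem_cons.mp hx' with rfl | hx''
              · exact le_of_lt (lt_of_lt_of_le hab (hbound a (by simp)))
              · exact hbound x (by simp [hx''])
        · obtain ⟨w, c, hw, hperm, hbound⟩ := ih (b :: t) (by simp at h2' ⊢; omega)
          refine ⟨a :: w, c, by simp [passN, hab, hw], ?_, ?_⟩
          · exact hperm.cons a
          · intro x hx
            rcases List.mem_cons.mp hx with rfl | hx'
            · exact le_trans (not_lt.mp hab) (hbound b (by simp))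
            · exact hbound x hx'

lemma outer_eq_bubAux : ∀ (k n : Nat) (l : List Int), k ≤ n → l.length = n →
    (List.range' (n - k) k).foldl
      (fun ks (i : Nat) => (PySem.List.pyRange 0 ((n : Int) - (i : Int) - 1) 1).foldl pvSwap ks) l
      = bubAux k l := by
  intro k
  induction k with
  | zero => intro n l _ _; rfl
  | succ k ih =>
      intro n l hk hl
      rw [List.range'_succ, List.foldl_cons]
      have hfuel : (n : Int) - ((n - (k + 1) : Nat) : Int) - 1 = (k : Int) := by omega
      rw [hfuel, inner_eq_passN k l (by omega)]
      have hstep : n - (k + 1) + 1 = n - k := by omega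
      rw [hstep]
      exact (ih n (passN k l) (by omega) (by rw [passN_length, hl]))

lemma bubAux_main : ∀ (m : Nat) (u v : List Int), u.length = m →
    v.Pairwise (· ≤ ·) → (∀ x ∈ u, ∀ y ∈ v, x ≤ y) →
    (bubAux m (u ++ v)).Perm (u ++ v) ∧ (bubAux m (u ++ v)).Pairwise (· ≤ ·) := by
  intro m
  induction m with
  | zero =>
      intro u v hu hv _
      match u, hu with
      | [], _ => exact ⟨List.Perm.refl _, by simpa using hv⟩
  | succ m ih =>
      intro u v hu hv huv
      have hps : passN m (u ++ v) = passN m u ++ v := passN_append m u v (by omega)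
      obtain ⟨w, b, hw, hperm, hbound⟩ := passN_max m u hu
      have hwlen : w.length = m := by
        have := hperm.length_eq; simp at this; omega
      have hbv : ∀ y ∈ v, b ≤ y := by
        intro y hy
        have hbmem : b ∈ u := hperm.mem_iff.mp (by simp)
        exact huv b hbmem y hy
      have hsorted' : (b :: v).Pairwise (· ≤ ·) := List.pairwise_cons.mpr ⟨hbv, hv⟩
      have hbound' : ∀ x ∈ w, ∀ y ∈ b :: v, x ≤ y := by
        intro x hx y hy
        have hxu : x ∈ u := hperm.mem_iff.mp (by simp [hx])
        rcases List.mem_cons.mp hy with rfl | hy'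
        · exact hbound x hxu
        · exact huv x hxu y hy'
      have key : bubAux (m + 1) (u ++ v) = bubAux m (w ++ (b :: v)) := by
        show bubAux m (passN m (u ++ v)) = _
        rw [hps, hw]; simp
      obtain ⟨hp, hs⟩ := ih w (b :: v) hwlen hsorted' hbound'
      rw [key]
      refine ⟨hp.trans ?_, hs⟩
      simpa [List.append_assoc] using hperm.append_right v

lemma bubble_eq_sorted (keys0 : List Int) :
    (PySem.List.pyRange 0 (keys0.length : Int) 1).foldl
      (fun ks i => (PySem.List.pyRange 0 ((keys0.length : Int) - i - 1) 1).foldl pvSwap ks) keys0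
      = PySem.List.sorted keys0 (fun k => k) false := by
  have h1 : (PySem.List.pyRange 0 (keys0.length : Int) 1).foldl
      (fun ks i => (PySem.List.pyRange 0 ((keys0.length : Int) - i - 1) 1).foldl pvSwap ks) keys0
      = bubAux keys0.length keys0 := by
    rw [PySem.List.pyRange_zero_natCast, List.foldl_map]
    have := outer_eq_bubAux keys0.length keys0.length keys0 le_rfl rfl
    rw [Nat.sub_self] at this
    rw [← this, List.range_eq_range']
  obtain ⟨hp, hs⟩ := bubAux_main keys0.length keys0 [] rfl (by simp) (by simp)
  simp only [List.append_nil] at hp hs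
  rw [h1]
  exact (PySem.List.sorted_id_eq_of_perm_of_pairwise keys0 _ hp hs).symm

-- ===== VERDICT (by name: the statement is the Claim_ definition above) =====
theorem sort_dict_by_key_spec : Claim_equal_sort_dict_by_key := by
  intro input_dict _
  unfold Spec_sort_dict_by_key
  simp only [sort_dict_by_key, sort_dict_by_key_alt, bubble_eq_sorted]
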